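-- pv_equiv track=rewrite | github.com/sandeep-daiict/coding-in-python | find_phone_number.py | find_phone_number
-- ===== SOURCE A (Python) =====
-- def find_phone_number(text):
--     s = ""
--     for i in text:
--         if i.isdigit():
--             s=s + '1'
--         else:
--             s=s + i
--
--     index1 = s.find("111-111-1111")
--     index2 = s.find("(111) 111-1111")
--
--     if index1 < 0 and index2 < 0:
--         return "NONE"
--     if index1 >= 0 and index2 < 0:
--         return text[index1:index1+12]
--     if index1 < 0 and index2 >= 0:
--         return text[index2:index2+14]
--     if index1 < index2:
--         return text[index1:index1+12]
--     return text[index2:index2+14]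
-- ===== SOURCE B (Python) =====
-- def _match_dashed(t, i, n):
--     return (i + 12 <= n
--             and t[i+3] == '-' and t[i+7] == '-'
--             and all(t[i+k].isdigit() for k in (0, 1, 2, 4, 5, 6, 8, 9, 10, 11)))
--
-- def _match_paren(t, i, n):
--     return (i + 14 <= n
--             and t[i] == '(' and t[i+4] == ')' and t[i+5] == ' ' and t[i+9] == '-'
--             and all(t[i+k].isdigit() for k in (1, 2, 3, 6, 7, 8, 10, 11, 12, 13)))
--
-- def find_phone_number(text):
--     n = len(text)
--     for i in range(n):
--         if _match_dashed(text, i, n):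
--             return text[i:i+12]
--         if _match_paren(text, i, n):
--             return text[i:i+14]
--     return "NONE"
-- ===== Notes on version B (the rewrite author's own statement) =====
-- stated objective: alternative
-- what changed: B drops A's digit-normalized copy of the text and its two str.find substring searches, instead scanning the text once and testing both patterns' character positions in place at each index, returning the first hit.
import Mathlib
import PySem

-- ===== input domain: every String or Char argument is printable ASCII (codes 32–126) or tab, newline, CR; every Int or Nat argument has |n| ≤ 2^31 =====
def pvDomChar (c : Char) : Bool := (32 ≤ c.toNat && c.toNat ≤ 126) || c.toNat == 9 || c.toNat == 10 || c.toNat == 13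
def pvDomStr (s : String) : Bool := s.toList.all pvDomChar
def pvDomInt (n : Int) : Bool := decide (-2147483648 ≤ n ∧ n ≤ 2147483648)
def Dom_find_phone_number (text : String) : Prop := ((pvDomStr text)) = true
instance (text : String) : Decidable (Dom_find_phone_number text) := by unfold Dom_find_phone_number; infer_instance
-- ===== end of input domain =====

-- B replaces A's normalized copy + two str.find passes by one direct scan of the
-- text that checks each pattern's character positions in place (alternative decomposition).

-- ===== PORT A =====
def find_phone_number (text : String) : String :=
  let s : List Char :=
    text.toList.foldl
      (fun acc c => if PySem.Chars.isdigit c then acc ++ ['1'] else acc ++ [c]) []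
  let index1 : Int := PySem.Chars.find s "111-111-1111".toList
  let index2 : Int := PySem.Chars.find s "(111) 111-1111".toList
  if index1 < 0 ∧ index2 < 0 then "NONE"
  else if index1 ≥ 0 ∧ index2 < 0 then PySem.Str.slice text (some index1) (some (index1 + 12))
  else if index1 < 0 ∧ index2 ≥ 0 then PySem.Str.slice text (some index2) (some (index2 + 14))
  else if index1 < index2 then PySem.Str.slice text (some index1) (some (index1 + 12))
  else PySem.Str.slice text (some index2) (some (index2 + 14))

-- ===== PORT B =====
def pvMatchDashed (t : List Char) (i n : Nat) : Bool :=
  decide (i + 12 ≤ n) && (t.getD (i+3) ' ' == '-') && (t.getD (i+7) ' ' == '-') &&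
    ([0,1,2,4,5,6,8,9,10,11].all (fun k => PySem.Chars.isdigit (t.getD (i+k) ' ')))

def pvMatchParen (t : List Char) (i n : Nat) : Bool :=
  decide (i + 14 ≤ n) && (t.getD i ' ' == '(') && (t.getD (i+4) ' ' == ')') &&
    (t.getD (i+5) ' ' == ' ') && (t.getD (i+9) ' ' == '-') &&
    ([1,2,3,6,7,8,10,11,12,13].all (fun k => PySem.Chars.isdigit (t.getD (i+k) ' ')))

def pvScan (cs : List Char) (rest : List Char) (i : Nat) : String :=
  match rest with
  | [] => "NONE"
  | _ :: tl =>
    if pvMatchDashed cs i cs.length then String.ofList ((cs.drop i).take 12)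
    else if pvMatchParen cs i cs.length then String.ofList ((cs.drop i).take 14)
    else pvScan cs tl (i+1)

def find_phone_number_alt (text : String) : String :=
  pvScan text.toList text.toList 0

-- ===== PRECONDITION & SPEC =====
def Spec_find_phone_number (text : String) (out : String) : Prop := out = find_phone_number_alt text
instance (text : String) (out : String) : Decidable (Spec_find_phone_number text out) := by unfold Spec_find_phone_number; infer_instance

-- ===== CLAIM (what is proved, stated in full; the proofs are below) =====
def Claim_equal_find_phone_number : Prop := ∀ (text : String), Dom_find_phone_number text → Spec_find_phone_number text (find_phone_number text)

-- ===== LEMMAS AND PROOFS =====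

def pvNorm (c : Char) : Char := if PySem.Chars.isdigit c then '1' else c

theorem pvFoldl_eq_map (cs : List Char) :
    cs.foldl (fun acc c => if PySem.Chars.isdigit c then acc ++ ['1'] else acc ++ [c]) [] =
      cs.map pvNorm := by
  have h : (fun (acc : List Char) c => if PySem.Chars.isdigit c then acc ++ ['1'] else acc ++ [c])
      = fun acc c => acc ++ [pvNorm c] := by
    funext acc c; unfold pvNorm; split <;> rfl
  rw [h, PySem.List.foldl_append_singleton_eq_map]; rfl

theorem pvNorm_eq_one (c : Char) : pvNorm c = '1' ↔ PySem.Chars.isdigit c = true := by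
  by_cases h : PySem.Chars.isdigit c = true
  · simp [pvNorm, h]
  · simp [pvNorm, h]
    intro hc; subst hc; exact h (by decide)

theorem pvNorm_eq_of_not_digit (c x : Char) (hx : PySem.Chars.isdigit x = false) :
    pvNorm c = x ↔ c = x := by
  unfold pvNorm
  split
  · rename_i h
    constructor
    · intro h1; subst h1; exact absurd hx (by decide)
    · intro h2; subst h2; rw [h] at hx; cases hx
  · exact Iff.rfl

theorem pvNorm_dash (c : Char) : pvNorm c = '-' ↔ c = '-' := pvNorm_eq_of_not_digit c '-' (by decide)
theorem pvNorm_lpar (c : Char) : pvNorm c = '(' ↔ c = '(' := pvNorm_eq_of_not_digit c '(' (by decide)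
theorem pvNorm_rpar (c : Char) : pvNorm c = ')' ↔ c = ')' := pvNorm_eq_of_not_digit c ')' (by decide)
theorem pvNorm_space (c : Char) : pvNorm c = ' ' ↔ c = ' ' := pvNorm_eq_of_not_digit c ' ' (by decide)

theorem pvDashed_chars_iff (ys : List Char) :
    (decide (12 ≤ ys.length) && (ys.getD 3 ' ' == '-') && (ys.getD 7 ' ' == '-') &&
      ([0,1,2,4,5,6,8,9,10,11].all (fun k => PySem.Chars.isdigit (ys.getD (0+k) ' ')))) = true ↔
    "111-111-1111".toList <+: ys.map pvNorm := by
  obtain _|⟨c0,_|⟨c1,_|⟨c2,_|⟨c3,_|⟨c4,_|⟨c5,_|⟨c6,_|⟨c7,_|⟨c8,_|⟨c9,_|⟨c10,_|⟨c11,ys⟩⟩⟩⟩⟩⟩⟩⟩⟩⟩⟩⟩ := ys <;>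
    simp [List.cons_prefix_iff, List.getD, pvNorm_eq_one, pvNorm_dash] <;> tauto

theorem pvParen_chars_iff (ys : List Char) :
    (decide (14 ≤ ys.length) && (ys.getD 0 ' ' == '(') && (ys.getD 4 ' ' == ')') &&
      (ys.getD 5 ' ' == ' ') && (ys.getD 9 ' ' == '-') &&
      ([1,2,3,6,7,8,10,11,12,13].all (fun k => PySem.Chars.isdigit (ys.getD (0+k) ' ')))) = true ↔
    "(111) 111-1111".toList <+: ys.map pvNorm := by
  obtain _|⟨c0,_|⟨c1,_|⟨c2,_|⟨c3,_|⟨c4,_|⟨c5,_|⟨c6,_|⟨c7,_|⟨c8,_|⟨c9,_|⟨c10,_|⟨c11,_|⟨c12,_|⟨c13,ys⟩⟩⟩⟩⟩⟩⟩⟩⟩⟩⟩⟩⟩⟩ := ys <;>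
    simp [List.cons_prefix_iff, List.getD, pvNorm_eq_one, pvNorm_lpar, pvNorm_rpar, pvNorm_space,
      pvNorm_dash] <;> tauto

theorem pvGetD_drop (cs : List Char) (i k : Nat) :
    (cs.drop i).getD k ' ' = cs.getD (i + k) ' ' := by
  simp [List.getD, List.getElem?_drop]

theorem pvMatchDashed_iff (cs : List Char) (i : Nat) :
    pvMatchDashed cs i cs.length = true ↔ "111-111-1111".toList <+: (cs.map pvNorm).drop i := by
  rw [← List.map_drop]
  rw [← pvDashed_chars_iff (cs.drop i)]
  unfold pvMatchDashed
  have hlen : (12 ≤ (cs.drop i).length) ↔ (i + 12 ≤ cs.length) := by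
    simp [List.length_drop]; omega
  simp only [pvGetD_drop, hlen, Nat.zero_add]

theorem pvMatchParen_iff (cs : List Char) (i : Nat) :
    pvMatchParen cs i cs.length = true ↔ "(111) 111-1111".toList <+: (cs.map pvNorm).drop i := by
  rw [← List.map_drop]
  rw [← pvParen_chars_iff (cs.drop i)]
  unfold pvMatchParen
  have hlen : (14 ≤ (cs.drop i).length) ↔ (i + 14 ≤ cs.length) := by
    simp [List.length_drop]; omega
  simp only [pvGetD_drop, hlen, Nat.zero_add, Nat.add_zero]

theorem pvPrefix_drop_infix {p s : List Char} {j : Nat} (h : p <+: s.drop j) : p <:+: s :=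
  h.isInfix.trans (List.drop_suffix j s).isInfix

theorem pvMatchDashed_len {cs : List Char} {i n : Nat} (h : pvMatchDashed cs i n = true) :
    i + 12 ≤ n := by
  simp [pvMatchDashed, Bool.and_eq_true] at h; exact h.1.1.1

theorem pvMatchParen_len {cs : List Char} {i n : Nat} (h : pvMatchParen cs i n = true) :
    i + 14 ≤ n := by
  simp [pvMatchParen, Bool.and_eq_true] at h; exact h.1.1.1.1.1

theorem pvScan_none (cs : List Char)
    (h : ∀ j, pvMatchDashed cs j cs.length = false ∧ pvMatchParen cs j cs.length = false) :
    ∀ (rest : List Char) (i : Nat), pvScan cs rest i = "NONE" := by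
  intro rest
  induction rest with
  | nil => intro i; simp [pvScan]
  | cons r tl ih => intro i; simp [pvScan, (h i).1, (h i).2, ih]

theorem pvScan_hit (cs : List Char) (m : Nat)
    (hm : pvMatchDashed cs m cs.length = true ∨ pvMatchParen cs m cs.length = true)
    (hmin : ∀ j < m, pvMatchDashed cs j cs.length = false ∧ pvMatchParen cs j cs.length = false)
    (hlen : m < cs.length) :
    ∀ (rest : List Char) (i : Nat), rest = cs.drop i → i ≤ m →
      pvScan cs rest i =
        if pvMatchDashed cs m cs.length then String.ofList ((cs.drop m).take 12)
        else String.ofList ((cs.drop m).take 14) := by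
  intro rest
  induction rest with
  | nil =>
    intro i hd hi
    exfalso
    have := List.drop_eq_nil_iff.mp hd.symm
    omega
  | cons r tl ih =>
    intro i hd hi
    rcases Nat.eq_or_lt_of_le hi with heq | hlt
    · subst heq
      rcases hm with h1 | h2
      · simp [pvScan, h1]
      · by_cases h1 : pvMatchDashed cs i cs.length = true
        · simp [pvScan, h1]
        · simp [pvScan, h1, h2]
    · have h1 := (hmin i hlt).1
      have h2 := (hmin i hlt).2
      have htl : tl = cs.drop (i + 1) := by
        have : cs.drop (i + 1) = (cs.drop i).drop 1 := by rw [List.drop_drop, Nat.add_comm]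
        rw [this, ← hd]; rfl
      simp only [pvScan, h1, h2, Bool.false_eq_true, if_false]
      exact ih (i + 1) htl hlt

theorem pvExclusive (zs : List Char)
    (h1 : "111-111-1111".toList <+: zs) (h2 : "(111) 111-1111".toList <+: zs) : False := by
  have e1 : ("111-111-1111".toList) = ['1','1','1','-','1','1','1','-','1','1','1','1'] := rfl
  have e2 : ("(111) 111-1111".toList) = ['(','1','1','1',')',' ','1','1','1','-','1','1','1','1'] := rfl
  rw [e1] at h1; rw [e2] at h2
  rcases h1 with ⟨t1, ht1⟩; rcases h2 with ⟨t2, ht2⟩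
  rw [← ht1] at ht2; simp at ht2

theorem pvSlice_eq (text : String) (j kI : Int) (m k : Nat)
    (hj : j = (m : Int)) (hk : kI = (k : Int)) :
    PySem.Str.slice text (some j) (some (j + kI)) =
      String.ofList ((text.toList.drop m).take k) := by
  subst hj; subst hk
  show String.ofList (PySem.Chars.slice text.toList _ _) = _
  rw [PySem.Chars.slice_eq_listSlice, PySem.List.slice_natCast_add]

-- ===== VERDICT (by name: the statement is the Claim_ definition above) =====
theorem find_phone_number_spec : Claim_equal_find_phone_number := by
  intro text _
  unfold Spec_find_phone_number
  simp only [find_phone_number, find_phone_number_alt, pvFoldl_eq_map]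
  set cs := text.toList with hcs
  set i1 := PySem.Chars.find (cs.map pvNorm) "111-111-1111".toList with hi1
  set i2 := PySem.Chars.find (cs.map pvNorm) "(111) 111-1111".toList with hi2
  have h1le : -1 ≤ i1 := PySem.Chars.neg_one_le_find _ _
  have h2le : -1 ≤ i2 := PySem.Chars.neg_one_le_find _ _
  have noneD : i1 = -1 → ∀ j, pvMatchDashed cs j cs.length = false := by
    intro h j
    by_contra hc
    rw [Bool.not_eq_false] at hc
    have hinf := pvPrefix_drop_infix ((pvMatchDashed_iff cs j).mp hc)
    have h0 := (PySem.Chars.find_nonneg_iff (cs.map pvNorm) "111-111-1111".toList).mpr hinf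
    rw [← hi1] at h0; omega
  have noneP : i2 = -1 → ∀ j, pvMatchParen cs j cs.length = false := by
    intro h j
    by_contra hc
    rw [Bool.not_eq_false] at hc
    have hinf := pvPrefix_drop_infix ((pvMatchParen_iff cs j).mp hc)
    have h0 := (PySem.Chars.find_nonneg_iff (cs.map pvNorm) "(111) 111-1111".toList).mpr hinf
    rw [← hi2] at h0; omega
  have foundD : 0 ≤ i1 → pvMatchDashed cs i1.toNat cs.length = true ∧
      ∀ j < i1.toNat, pvMatchDashed cs j cs.length = false := by
    intro h
    obtain ⟨hp, hmin⟩ := PySem.Chars.find_spec (s := cs.map pvNorm) (sub := "111-111-1111".toList) h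
    refine ⟨(pvMatchDashed_iff cs i1.toNat).mpr hp, fun j hj => ?_⟩
    by_contra hc
    rw [Bool.not_eq_false] at hc
    exact hmin j hj ((pvMatchDashed_iff cs j).mp hc)
  have foundP : 0 ≤ i2 → pvMatchParen cs i2.toNat cs.length = true ∧
      ∀ j < i2.toNat, pvMatchParen cs j cs.length = false := by
    intro h
    obtain ⟨hp, hmin⟩ := PySem.Chars.find_spec (s := cs.map pvNorm) (sub := "(111) 111-1111".toList) h
    refine ⟨(pvMatchParen_iff cs i2.toNat).mpr hp, fun j hj => ?_⟩
    by_contra hc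
    rw [Bool.not_eq_false] at hc
    exact hmin j hj ((pvMatchParen_iff cs j).mp hc)
  have hdrop0 : cs = cs.drop 0 := (List.drop_zero (l := cs)).symm
  by_cases hA : i1 < 0 ∧ i2 < 0
  · rw [if_pos hA]
    exact (pvScan_none cs (fun j => ⟨noneD (by omega) j, noneP (by omega) j⟩) cs 0).symm
  · rw [if_neg hA]
    by_cases hB : i1 ≥ 0 ∧ i2 < 0
    · rw [if_pos hB]
      obtain ⟨hm, hmin⟩ := foundD hB.1
      have hlen : i1.toNat < cs.length := by have := pvMatchDashed_len hm; omega
      have hscan := pvScan_hit cs i1.toNat (Or.inl hm)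
        (fun j hj => ⟨hmin j hj, noneP (by omega) j⟩) hlen cs 0 hdrop0 (Nat.zero_le _)
      rw [hscan, if_pos hm, pvSlice_eq text i1 12 i1.toNat 12 (Int.toNat_of_nonneg hB.1).symm (by norm_num)]
    · rw [if_neg hB]
      by_cases hC : i1 < 0 ∧ i2 ≥ 0
      · rw [if_pos hC]
        obtain ⟨hm, hmin⟩ := foundP hC.2
        have hlen : i2.toNat < cs.length := by have := pvMatchParen_len hm; omega
        have hd := noneD (by omega)
        have hscan := pvScan_hit cs i2.toNat (Or.inr hm)
          (fun j hj => ⟨hd j, hmin j hj⟩) hlen cs 0 hdrop0 (Nat.zero_le _)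
        rw [hscan, if_neg (by simp [hd i2.toNat]), pvSlice_eq text i2 14 i2.toNat 14 (Int.toNat_of_nonneg hC.2).symm (by norm_num)]
      · rw [if_neg hC]
        have h10 : 0 ≤ i1 := by omega
        have h20 : 0 ≤ i2 := by omega
        obtain ⟨hmD, hminD⟩ := foundD h10
        obtain ⟨hmP, hminP⟩ := foundP h20
        have hne : i1 ≠ i2 := by
          intro he
          have hP2 := (pvMatchParen_iff cs i2.toNat).mp hmP
          rw [← he] at hP2
          exact pvExclusive _ ((pvMatchDashed_iff cs i1.toNat).mp hmD) hP2
        by_cases hD : i1 < i2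
        · rw [if_pos hD]
          have hlt : i1.toNat < i2.toNat := by omega
          have hlen : i1.toNat < cs.length := by have := pvMatchDashed_len hmD; omega
          have hscan := pvScan_hit cs i1.toNat (Or.inl hmD)
            (fun j hj => ⟨hminD j hj, hminP j (by omega)⟩) hlen cs 0 hdrop0 (Nat.zero_le _)
          rw [hscan, if_pos hmD, pvSlice_eq text i1 12 i1.toNat 12 (Int.toNat_of_nonneg h10).symm (by norm_num)]
        · rw [if_neg hD]
          have hlt : i2.toNat < i1.toNat := by omega
          have hlen : i2.toNat < cs.length := by have := pvMatchParen_len hmP; omega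
          have hscan := pvScan_hit cs i2.toNat (Or.inr hmP)
            (fun j hj => ⟨hminD j (by omega), hminP j hj⟩) hlen cs 0 hdrop0 (Nat.zero_le _)
          rw [hscan, if_neg (by simp [hminD i2.toNat hlt]), pvSlice_eq text i2 14 i2.toNat 14 (Int.toNat_of_nonneg h20).symm (by norm_num)]
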